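-- pv_equiv track=rewrite | github.com/Hanzhaozoe/hanzhaozoe.github.io | PythonCode/Reed Muller/RMParams.py | RMParams
-- ===== SOURCE A (Python) =====
-- import math
--
-- def RMParams(r,m):
--     n = 2**m
--     d = 2**(m-r)
--     k = 0
--     i = 0
--     if m == 0:
--         return (1, 1, 0)
--     for i in range(0,r+1):
--         temp1 = math.factorial(m)
--         temp2 = math.factorial(i)
--         temp3 = math.factorial(m-i)
--         k += temp1 // ( temp2 * temp3 )
--     return (n, k, d)
-- ===== SOURCE B (Python) =====
-- def RMParams(r, m):
--     if m == 0:
--         return (1, 1, 0)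
--     k = 0
--     c = 1  # running binomial C(m, i)
--     for i in range(r + 1):
--         k += c
--         c = c * (m - i) // (i + 1)
--     return (2 ** m, k, 2 ** (m - r))
-- ===== Notes on version B (the rewrite author's own statement) =====
-- stated objective: faster
-- what changed: replaces the per-term factorial computation (three factorials and a big division per binomial summand) by a single running binomial coefficient updated incrementally with one multiply and one exact division per step
-- outside the precondition, e.g. on RMParams(-2, -1): A returns (0.5, 0, 2), B returns (0.5, 0, 2); on RMParams(5, 4): A raises ValueError, B returns (16, 16, 0.5)
import Mathlib
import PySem

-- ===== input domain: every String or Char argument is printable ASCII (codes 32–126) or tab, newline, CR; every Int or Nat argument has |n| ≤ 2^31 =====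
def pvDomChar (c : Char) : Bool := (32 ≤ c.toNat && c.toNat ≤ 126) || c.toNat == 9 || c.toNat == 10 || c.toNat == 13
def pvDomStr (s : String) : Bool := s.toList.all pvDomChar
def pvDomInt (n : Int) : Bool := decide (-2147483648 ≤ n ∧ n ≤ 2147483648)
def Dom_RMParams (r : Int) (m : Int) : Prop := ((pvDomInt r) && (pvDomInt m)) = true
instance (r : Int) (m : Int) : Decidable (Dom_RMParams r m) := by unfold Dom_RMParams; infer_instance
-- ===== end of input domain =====

-- B replaces A's three-factorials-per-term binomial by one running binomial coefficient
-- updated incrementally (one multiply, one exact division per step): asymptotically fewer big-int operations.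

-- ===== PORT A =====
-- math.factorial (arguments are nonnegative on every input Pre_ admits)
def pvFact (i : Int) : Int := Int.ofNat (Nat.factorial i.toNat)

def RMParams (r : Int) (m : Int) : List Int :=
  let n : Int := 2 ^ m.toNat
  let d : Int := 2 ^ (m - r).toNat
  if m = 0 then [1, 1, 0]
  else
    let k := (PySem.List.pyRange 0 (r + 1) 1).foldl
      (fun k i => k + PySem.Int.floordiv (pvFact m) (pvFact i * pvFact (m - i))) 0
    [n, k, d]

-- ===== PORT B =====
def RMParams_alt (r : Int) (m : Int) : List Int :=
  if m = 0 then [1, 1, 0]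
  else
    let p := (PySem.List.pyRange 0 (r + 1) 1).foldl
      (fun (p : Int × Int) i => (p.1 + p.2, PySem.Int.floordiv (p.2 * (m - i)) (i + 1))) (0, 1)
    [2 ^ m.toNat, p.1, 2 ^ (m - r).toNat]

-- ===== PRECONDITION & SPEC =====
-- Pre_ excludes negative m (A raises ValueError in math.factorial, or for r < 0 returns a tuple of
-- floats, not integers) and r > m with m > 0 (A raises ValueError in math.factorial(m - i)).
def Pre_RMParams (r : Int) (m : Int) : Prop := 0 ≤ m ∧ (m = 0 ∨ r ≤ m)
instance (r : Int) (m : Int) : Decidable (Pre_RMParams r m) := by unfold Pre_RMParams; infer_instance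
def pvWitness_RMParams : Int × Int := (2, 4)

def Spec_RMParams (r : Int) (m : Int) (out : List Int) : Prop := out = RMParams_alt r m
instance (r : Int) (m : Int) (out : List Int) : Decidable (Spec_RMParams r m out) := by unfold Spec_RMParams; infer_instance

-- ===== CLAIM (what is proved, stated in full; the proofs are below) =====
def Claim_equal_RMParams : Prop := ∀ (r : Int) (m : Int), Dom_RMParams r m → Pre_RMParams r m → Spec_RMParams r m (RMParams r m)

-- ===== LEMMAS AND PROOFS =====

-- both folds over range(j), j ≤ M+1: A's sum equals B's running sum, and B's carry is C(M, j)
theorem pv_fold_eq (M : Nat) :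
    ∀ (j : Nat), j ≤ M + 1 →
      ∃ s : Int,
        (PySem.List.pyRange 0 (j : Int) 1).foldl
            (fun k i => k + PySem.Int.floordiv (pvFact (M : Int)) (pvFact i * pvFact ((M : Int) - i))) 0 = s ∧
        (PySem.List.pyRange 0 (j : Int) 1).foldl
            (fun (p : Int × Int) i => (p.1 + p.2, PySem.Int.floordiv (p.2 * ((M : Int) - i)) (i + 1))) (0, 1)
          = (s, (Nat.choose M j : Int)) := by
  intro j
  induction j with
  | zero =>
    intro _
    refine ⟨0, ?_, ?_⟩ <;> simp [PySem.List.pyRange_one_eq_nil]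
  | succ j ih =>
    intro hj1
    have hjM : j ≤ M := by omega
    obtain ⟨s, hA, hB⟩ := ih (by omega)
    have hsplit : PySem.List.pyRange 0 ((j : Int) + 1) 1
        = PySem.List.pyRange 0 (j : Int) 1 ++ [(j : Int)] :=
      PySem.List.pyRange_one_succ_right (by exact_mod_cast Nat.zero_le j)
    have hcast : ((j + 1 : Nat) : Int) = (j : Int) + 1 := by push_cast; ring
    have hsub : (M : Int) - (j : Int) = ((M - j : Nat) : Int) := by
      push_cast [Nat.cast_sub hjM]; ring
    -- A's new term is C(M, j)
    have htermA : PySem.Int.floordiv (pvFact (M : Int)) (pvFact (j : Int) * pvFact ((M : Int) - (j : Int)))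
        = (Nat.choose M j : Int) := by
      rw [hsub]
      show PySem.Int.floordiv ((Nat.factorial M : Nat) : Int)
          (((Nat.factorial j : Nat) : Int) * ((Nat.factorial (M - j) : Nat) : Int)) = _
      rw [← Nat.cast_mul, PySem.Int.floordiv_natCast,
        ← Nat.choose_eq_factorial_div_factorial hjM]
    -- B's carry update gives C(M, j+1)
    have htermB : PySem.Int.floordiv ((Nat.choose M j : Int) * ((M : Int) - (j : Int))) ((j : Int) + 1)
        = (Nat.choose M (j + 1) : Int) := by
      rw [hsub, ← Nat.cast_mul]
      have h1 : ((j : Int) + 1) = ((j + 1 : Nat) : Int) := by push_cast; ring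
      rw [h1, PySem.Int.floordiv_natCast]
      have h2 : Nat.choose M j * (M - j) = Nat.choose M (j + 1) * (j + 1) :=
        (Nat.choose_succ_right_eq M j).symm
      rw [h2, Nat.mul_div_cancel _ (Nat.succ_pos j)]
    refine ⟨s + (Nat.choose M j : Int), ?_, ?_⟩
    · rw [hcast, hsplit, List.foldl_append, hA]
      simp [htermA]
    · rw [hcast, hsplit, List.foldl_append, hB]
      simp only [List.foldl_cons, List.foldl_nil]
      rw [htermB]

-- ===== VERDICT (by name: the statement is the Claim_ definition above) =====
theorem RMParams_spec : Claim_equal_RMParams := by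
  intro r m _ hpre
  obtain ⟨hm0, hor⟩ := hpre
  unfold Spec_RMParams RMParams RMParams_alt
  by_cases hm : m = 0
  · simp [hm]
  · simp only [if_neg hm]
    have hmpos : 0 < m := lt_of_le_of_ne hm0 (Ne.symm hm)
    have hrm : r ≤ m := hor.resolve_left hm
    by_cases hr : r + 1 ≤ 0
    · rw [PySem.List.pyRange_one_eq_nil hr]
      simp
    · -- 0 ≤ r : both folds run over range(r+1)
      rw [not_le] at hr
      obtain ⟨R, hR⟩ : ∃ R : Nat, r = (R : Int) := ⟨r.toNat, (Int.toNat_of_nonneg (by omega)).symm⟩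
      obtain ⟨M, hM⟩ : ∃ M : Nat, m = (M : Int) := ⟨m.toNat, (Int.toNat_of_nonneg hm0).symm⟩
      subst hR hM
      have hRM : R + 1 ≤ M + 1 := by
        have : (R : Int) ≤ (M : Int) := hrm
        exact_mod_cast Nat.succ_le_succ (by exact_mod_cast this)
      obtain ⟨s, hA, hB⟩ := pv_fold_eq M (R + 1) hRM
      have hc : ((R + 1 : Nat) : Int) = (R : Int) + 1 := by push_cast; ring
      rw [hc] at hA hB
      simp only [hA, hB]
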